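-- pv_equiv track=rewrite | github.com/Helliaca/helliaca.github.io | scripts/parse.py | loop_parser
-- ===== SOURCE A (Python) =====
-- def loop_parser(s):
--     found = False
--     before = ""
--     embed = []
--     after = ""
--
--     i = 0
--     ic = 0
--     while i<len(s):
--
--         if s[i:i+8] == "$forall$":
--
--             # if we havent found a previous one
--             if not found:
--                 before = s[0:i] # Set before and found
--                 found = True
--
--             # if we already found one, add this to the embed
--             else:
--                 embed.append(s[i])
--
--             ic += 1 # increase if-counter
--             i+=8
--
--         elif s[i:i+8] == "$endfor$":
--
--             ic -= 1 # lower counter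
--
--             # if we have 0 on the stack -> end
--             if ic==0:
--                 after = s[i+8:]
--                 break
--             # otherwise add it to the embed
--             else:
--                 embed.append(s[i:i+8])
--
--             i += 8
--
--         # Nothing special at this position
--         else:
--             if found:
--                 embed.append(s[i])
--             i+=1
--
--     embed = ''.join(embed)
--
--     return found, before, embed, after
-- ===== SOURCE B (Python) =====
-- def loop_parser(s):
--     found = False
--     before = ""
--     embed = []
--     after = ""
--     ic = 0
--     i = 0
--     while True:
--         pf = s.find("$forall$", i)
--         pe = s.find("$endfor$", i)
--         if pf == -1 and pe == -1:
--             if found: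
--                 embed.append(s[i:])
--             break
--         if pe == -1 or (pf != -1 and pf < pe):
--             pos, is_forall = pf, True
--         else:
--             pos, is_forall = pe, False
--         if found:
--             embed.append(s[i:pos])
--         if is_forall:
--             if not found:
--                 before = s[:pos]
--                 found = True
--             else:
--                 embed.append("$")
--             ic += 1
--         else:
--             ic -= 1
--             if ic == 0:
--                 after = s[pos + 8:]
--                 break
--             else:
--                 embed.append("$endfor$")
--         i = pos + 8
--     return found, before, ''.join(embed), after
-- ===== Notes on version B (the rewrite author's own statement) =====
-- stated objective: faster
-- what changed: B replaces A's per-character while-loop (slicing s[i:i+8] at every position) by a cursor that jumps directly between token occurrences located with str.find, appending whole gap substrings at once.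
import Mathlib
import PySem

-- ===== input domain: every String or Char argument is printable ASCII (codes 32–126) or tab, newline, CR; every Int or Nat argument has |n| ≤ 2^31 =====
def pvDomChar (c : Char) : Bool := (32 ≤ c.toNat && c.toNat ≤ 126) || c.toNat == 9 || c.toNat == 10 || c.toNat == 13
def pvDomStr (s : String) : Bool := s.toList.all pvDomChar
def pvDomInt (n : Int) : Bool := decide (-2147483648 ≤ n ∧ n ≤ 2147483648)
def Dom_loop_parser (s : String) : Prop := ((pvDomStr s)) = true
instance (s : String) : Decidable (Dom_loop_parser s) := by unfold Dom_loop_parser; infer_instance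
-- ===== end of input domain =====

-- B replaces A's per-character scan by a cursor that jumps between token occurrences
-- located with str.find (objective: faster by a constant factor; same results).

-- ===== PORT A =====
-- "$forall$" and "$endfor$" as character lists
def tokF : List Char := ['$','f','o','r','a','l','l','$']
def tokE : List Char := ['$','e','n','d','f','o','r','$']

-- the while loop of A; embed is kept as the concatenation of the appended pieces
-- (A joins them at the end; appending characters directly builds the same string).
-- Python slices s[i:i+8], s[0:i], s[i+8:] with i ≥ 0 : Nat are exactly
-- (cs.drop i).take 8, cs.take i, cs.drop (i+8).
def aLoop (cs : List Char) (i : Nat) (found : Bool) (before embed : List Char)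
    (ic : Int) : Bool × List Char × List Char × List Char :=
  if h : i < cs.length then
    if (cs.drop i).take 8 = tokF then
      if found then
        aLoop cs (i+8) found before (embed ++ [cs[i]]) (ic+1)
      else
        aLoop cs (i+8) true (cs.take i) embed (ic+1)
    else if (cs.drop i).take 8 = tokE then
      if ic - 1 = 0 then (found, before, embed, cs.drop (i+8))
      else aLoop cs (i+8) found before (embed ++ tokE) (ic-1)
    else
      aLoop cs (i+1) found before (if found then embed ++ [cs[i]] else embed) ic
  else (found, before, embed, [])
termination_by cs.length - i
decreasing_by
  all_goals first
    | exact Nat.sub_lt_sub_left h (Nat.lt_add_of_pos_right (Nat.succ_pos 7))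
    | exact Nat.sub_lt_sub_left h (Nat.lt_succ_self i)

def loop_parser (s : String) : Bool × String × String × String :=
  let r := aLoop s.toList 0 false [] [] 0
  (r.1, String.ofList r.2.1, String.ofList r.2.2.1, String.ofList r.2.2.2)

-- ===== PORT B =====
-- s.find(tok, i): least p ≥ i with a match, none if absent (tok here is never empty)
def findFrom (cs tok : List Char) (i : Nat) : Option Nat :=
  if i + tok.length ≤ cs.length then
    if (cs.drop i).take tok.length = tok then some i
    else findFrom cs tok (i+1)
  else none
termination_by cs.length + 1 - i
decreasing_by
  exact Nat.sub_lt_sub_left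
    (Nat.lt_succ_of_le (Nat.le_trans (Nat.le_add_right i tok.length) ‹i + tok.length ≤ cs.length›))
    (Nat.lt_succ_self i)

theorem tokF_len : tokF.length = 8 := by decide
theorem tokE_len : tokE.length = 8 := by decide

-- needed by bLoop's termination proof
theorem findFrom_some_bounds (cs tok : List Char) (i p : Nat)
    (h : findFrom cs tok i = some p) : i ≤ p ∧ p + tok.length ≤ cs.length := by
  fun_induction findFrom cs tok i with
  | case1 i hle hm => cases Option.some.inj h; exact ⟨Nat.le_refl _, hle⟩
  | case2 i hle hm ih => exact ⟨Nat.le_trans (Nat.le_succ i) (ih h).1, (ih h).2⟩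
  | case3 i hle => exact nomatch h

-- the pos / is_forall selection of Source B: nearest next token and its kind
def nextTok (cs : List Char) (i : Nat) : Option (Nat × Bool) :=
  match findFrom cs tokF i, findFrom cs tokE i with
  | none, none => none
  | some pf, none => some (pf, true)
  | none, some pe => some (pe, false)
  | some pf, some pe => if pf < pe then some (pf, true) else some (pe, false)

-- needed by bLoop's termination proof
theorem nextTok_bounds (cs : List Char) (i pos : Nat) (isF : Bool)
    (h : nextTok cs i = some (pos, isF)) : i ≤ pos ∧ pos + 8 ≤ cs.length := by
  unfold nextTok at h
  split at h
  · exact nomatch h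
  · rename_i pf hf he
    injection h with h; injection h with h1 h2; subst h1
    have := (findFrom_some_bounds cs tokF i pf hf)
    rw [tokF_len] at this; exact this
  · rename_i pe hf he
    injection h with h; injection h with h1 h2; subst h1
    have := (findFrom_some_bounds cs tokE i pe he)
    rw [tokE_len] at this; exact this
  · rename_i pf pe hf he
    split at h <;>
      (injection h with h; injection h with h1 h2; subst h1)
    · have := (findFrom_some_bounds cs tokF i pf hf)
      rw [tokF_len] at this; exact this
    · have := (findFrom_some_bounds cs tokE i pe he)
      rw [tokE_len] at this; exact this

def bLoop (cs : List Char) (i : Nat) (found : Bool) (before embed : List Char)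
    (ic : Int) : Bool × List Char × List Char × List Char :=
  match h : nextTok cs i with
  | none => (found, before, if found then embed ++ cs.drop i else embed, [])
  | some (pos, isF) =>
      let embed' := if found then embed ++ (cs.drop i).take (pos - i) else embed
      if isF then
        if found then bLoop cs (pos+8) found before (embed' ++ ['$']) (ic+1)
        else bLoop cs (pos+8) true (cs.take pos) embed' (ic+1)
      else
        if ic - 1 = 0 then (found, before, embed', cs.drop (pos+8))
        else bLoop cs (pos+8) found before (embed' ++ tokE) (ic-1)
termination_by cs.length + 1 - i
decreasing_by
  all_goals
    have hb := nextTok_bounds cs i pos isF h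
    exact Nat.sub_lt_sub_left
      (Nat.lt_succ_of_le (Nat.le_trans hb.1 (Nat.le_trans (Nat.le_add_right pos 8) hb.2)))
      (Nat.lt_of_le_of_lt hb.1 (Nat.lt_add_of_pos_right (Nat.succ_pos 7)))

def loop_parser_alt (s : String) : Bool × String × String × String :=
  let r := bLoop s.toList 0 false [] [] 0
  (r.1, String.ofList r.2.1, String.ofList r.2.2.1, String.ofList r.2.2.2)

-- ===== PRECONDITION & SPEC =====
def Spec_loop_parser (s : String) (out : Bool × String × String × String) : Prop := out = loop_parser_alt s
instance (s : String) (out : Bool × String × String × String) : Decidable (Spec_loop_parser s out) := by unfold Spec_loop_parser; infer_instance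

-- ===== CLAIM (what is proved, stated in full; the proofs are below) =====
def Claim_equal_loop_parser : Prop := ∀ (s : String), Dom_loop_parser s → Spec_loop_parser s (loop_parser s)

-- ===== LEMMAS AND PROOFS =====

theorem findFrom_some_spec (cs tok : List Char) (i p : Nat)
    (h : findFrom cs tok i = some p) :
    i ≤ p ∧ (cs.drop p).take tok.length = tok ∧
      ∀ j, i ≤ j → j < p → (cs.drop j).take tok.length ≠ tok := by
  fun_induction findFrom cs tok i with
  | case1 i hle hm =>
      obtain rfl : i = p := Option.some.inj h
      exact ⟨le_rfl, hm, fun j h1 h2 => absurd h1 (by omega)⟩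
  | case2 i hle hm ih =>
      obtain ⟨h1, h2, h3⟩ := ih h
      refine ⟨by omega, h2, fun j hj1 hj2 => ?_⟩
      rcases Nat.eq_or_lt_of_le hj1 with hj | hj
      · subst hj; exact hm
      · exact h3 j hj hj2
  | case3 i hle => exact absurd h (by simp)

theorem findFrom_none_spec (cs tok : List Char) (i : Nat) (htok : 0 < tok.length)
    (h : findFrom cs tok i = none) :
    ∀ j, i ≤ j → (cs.drop j).take tok.length ≠ tok := by
  fun_induction findFrom cs tok i with
  | case1 i hle hm => exact absurd h (by simp)
  | case2 i hle hm ih =>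
      intro j hj
      rcases Nat.eq_or_lt_of_le hj with hj' | hj'
      · subst hj'; exact hm
      · exact ih h j hj'
  | case3 i hle =>
      intro j hj heq
      have hl : ((cs.drop j).take tok.length).length = tok.length := by rw [heq]
      rw [List.length_take, List.length_drop] at hl
      omega

-- A's loop past the last token occurrence: appends the remaining characters (if found)
theorem aLoop_tail (cs : List Char) (n i : Nat) (hn : cs.length - i ≤ n)
    (hF : ∀ j, i ≤ j → (cs.drop j).take 8 ≠ tokF)
    (hE : ∀ j, i ≤ j → (cs.drop j).take 8 ≠ tokE)
    (found : Bool) (before embed : List Char) (ic : Int) :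
    aLoop cs i found before embed ic
      = (found, before, if found then embed ++ cs.drop i else embed, []) := by
  induction n generalizing i embed with
  | zero =>
      have hd : cs.drop i = [] := List.drop_eq_nil_of_le (by omega)
      rw [aLoop, dif_neg (by omega : ¬ i < cs.length), hd]
      cases found <;> simp
  | succ n ih =>
      by_cases h : i < cs.length
      · rw [aLoop, dif_pos h, if_neg (hF i le_rfl), if_neg (hE i le_rfl)]
        rw [ih (i+1) (by omega) (fun j hj => hF j (by omega)) (fun j hj => hE j (by omega))]
        have hd : cs.drop i = cs[i] :: cs.drop (i+1) := List.drop_eq_getElem_cons h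
        cases found
        · rfl
        · rw [if_pos rfl, if_pos rfl, if_pos rfl, hd, List.append_assoc, List.singleton_append]
      · have hd : cs.drop i = [] := List.drop_eq_nil_of_le (by omega)
        rw [aLoop, dif_neg h, hd]
        cases found <;> simp

-- A's loop from i to the next token position p: appends the gap characters (if found)
theorem aLoop_skip (cs : List Char) (n i p : Nat) (hn : p - i ≤ n) (hip : i ≤ p)
    (hp : p ≤ cs.length)
    (hF : ∀ j, i ≤ j → j < p → (cs.drop j).take 8 ≠ tokF)
    (hE : ∀ j, i ≤ j → j < p → (cs.drop j).take 8 ≠ tokE)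
    (found : Bool) (before embed : List Char) (ic : Int) :
    aLoop cs i found before embed ic
      = aLoop cs p found before
          (if found then embed ++ (cs.drop i).take (p - i) else embed) ic := by
  induction n generalizing i embed with
  | zero =>
      have : i = p := by omega
      subst this
      cases found <;> simp
  | succ n ih =>
      rcases Nat.eq_or_lt_of_le hip with he | hlt
      · subst he; cases found <;> simp
      · have h : i < cs.length := by omega
        rw [aLoop, dif_pos h, if_neg (hF i le_rfl hlt), if_neg (hE i le_rfl hlt)]
        rw [ih (i+1) (by omega) (by omega) (fun j hj => hF j (by omega))
            (fun j hj => hE j (by omega))]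
        have hd : cs.drop i = cs[i] :: cs.drop (i+1) := List.drop_eq_getElem_cons h
        have ht : (cs.drop i).take (p - i) = cs[i] :: (cs.drop (i+1)).take (p - (i+1)) := by
          rw [hd]
          have h2 : p - i = (p - (i+1)) + 1 := by omega
          rw [h2, List.take_succ_cons]
        cases found <;> simp [ht]

-- at a "$forall$" match the current character is '$'
theorem match_head (cs : List Char) (p : Nat)
    (h : (cs.drop p).take 8 = tokF) (hp : p < cs.length) : cs[p] = '$' := by
  have hd : cs.drop p = cs[p] :: cs.drop (p+1) := List.drop_eq_getElem_cons hp
  have h2 : cs[p] :: (cs.drop (p+1)).take 7 = tokF := by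
    rw [← h, hd, List.take_succ_cons]
  exact (List.cons.injEq _ _ _ _ ▸ h2).1

theorem nextTok_none (cs : List Char) (i : Nat) (h : nextTok cs i = none) :
    findFrom cs tokF i = none ∧ findFrom cs tokE i = none := by
  unfold nextTok at h
  split at h
  · rename_i hf he; exact ⟨hf, he⟩
  · exact absurd h (by simp)
  · exact absurd h (by simp)
  · split at h <;> exact absurd h (by simp)

theorem nextTok_spec (cs : List Char) (i pos : Nat) (isF : Bool)
    (h : nextTok cs i = some (pos, isF)) :
    (cs.drop pos).take 8 = (if isF then tokF else tokE) ∧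
      (isF = false → (cs.drop pos).take 8 ≠ tokF) ∧
      (∀ j, i ≤ j → j < pos → (cs.drop j).take 8 ≠ tokF) ∧
      (∀ j, i ≤ j → j < pos → (cs.drop j).take 8 ≠ tokE) := by
  unfold nextTok at h
  split at h
  · exact absurd h (by simp)
  · -- only "$forall$", at pf
    rename_i pf hf he
    injection h with h; injection h with h1 h2; subst h1; subst h2
    obtain ⟨hip, hm, hpre⟩ := findFrom_some_spec cs tokF i pf hf
    rw [tokF_len] at hm hpre
    have hEall := findFrom_none_spec cs tokE i (by rw [tokE_len]; omega) he
    rw [tokE_len] at hEall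
    exact ⟨by simpa using hm, fun hc => by simp at hc, fun j hj hjp => hpre j hj hjp,
      fun j hj _ => hEall j hj⟩
  · -- only "$endfor$", at pe
    rename_i pe hf he
    injection h with h; injection h with h1 h2; subst h1; subst h2
    obtain ⟨hip, hm, hpre⟩ := findFrom_some_spec cs tokE i pe he
    rw [tokE_len] at hm hpre
    have hFall := findFrom_none_spec cs tokF i (by rw [tokF_len]; omega) hf
    rw [tokF_len] at hFall
    exact ⟨by simpa using hm, fun _ => hFall pe hip, fun j hj _ => hFall j hj,
      fun j hj hjp => hpre j hj hjp⟩
  · -- both found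
    rename_i pf pe hf he
    obtain ⟨hipf, hmF, hpreF⟩ := findFrom_some_spec cs tokF i pf hf
    obtain ⟨hipe, hmE, hpreE⟩ := findFrom_some_spec cs tokE i pe he
    rw [tokF_len] at hmF hpreF; rw [tokE_len] at hmE hpreE
    have hne : pf ≠ pe := by
      intro h'; rw [h'] at hmF; rw [hmF] at hmE; exact absurd hmE (by decide)
    split at h <;> rename_i hlt <;>
      (injection h with h; injection h with h1 h2; subst h1; subst h2)
    · exact ⟨by simpa using hmF, fun hc => by simp at hc, fun j hj hjp => hpreF j hj hjp,
        fun j hj hjp => hpreE j hj (by omega)⟩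
    · have hlt' : pe < pf := by omega
      exact ⟨by simpa using hmE, fun _ => hpreF pe hipe hlt', fun j hj hjp => hpreF j hj (by omega),
        fun j hj hjp => hpreE j hj hjp⟩

-- main loop equivalence, by induction on the remaining length
theorem loop_eq (cs : List Char) (n : Nat) :
    ∀ i, cs.length + 1 - i ≤ n → ∀ found before embed ic,
      aLoop cs i found before embed ic = bLoop cs i found before embed ic := by
  induction n with
  | zero =>
      intro i hi found before embed ic
      rw [bLoop]
      split
      · rename_i h
        obtain ⟨hfF, hfE⟩ := nextTok_none cs i h
        have h1 := findFrom_none_spec cs tokF i (by rw [tokF_len]; omega) hfF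
        have h2 := findFrom_none_spec cs tokE i (by rw [tokE_len]; omega) hfE
        rw [tokF_len] at h1; rw [tokE_len] at h2
        exact aLoop_tail cs (cs.length - i) i le_rfl h1 h2 found before embed ic
      · rename_i pos isF h
        have := nextTok_bounds cs i pos isF h
        omega
  | succ n ih =>
      intro i hi found before embed ic
      rw [bLoop]
      split
      · -- no token remains
        rename_i h
        obtain ⟨hfF, hfE⟩ := nextTok_none cs i h
        have h1 := findFrom_none_spec cs tokF i (by rw [tokF_len]; omega) hfF
        have h2 := findFrom_none_spec cs tokE i (by rw [tokE_len]; omega) hfE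
        rw [tokF_len] at h1; rw [tokE_len] at h2
        exact aLoop_tail cs (cs.length - i) i le_rfl h1 h2 found before embed ic
      · -- a token at pos
        rename_i pos isF h
        obtain ⟨hip, hpos8⟩ := nextTok_bounds cs i pos isF h
        obtain ⟨hm, hnotF, hpreF, hpreE⟩ := nextTok_spec cs i pos isF h
        rw [aLoop_skip cs (pos - i) i pos le_rfl hip (by omega)
              (fun j hj hjp => hpreF j hj hjp) (fun j hj hjp => hpreE j hj hjp)]
        have hpl : pos < cs.length := by omega
        rw [aLoop, dif_pos hpl]
        cases isF
        · -- "$endfor$"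
          simp only [Bool.false_eq_true, if_false] at hm ⊢
          rw [if_neg (hnotF rfl), if_pos hm]
          by_cases hic : ic - 1 = 0
          · rw [if_pos hic, if_pos hic]
          · rw [if_neg hic, if_neg hic]
            exact ih (pos + 8) (by omega) _ _ _ _
        · -- "$forall$"
          rw [if_pos rfl] at hm
          rw [if_pos hm]
          have hch : cs[pos] = '$' := match_head cs pos hm hpl
          cases found
          · rw [if_neg (by simp), if_neg (by simp), if_pos rfl]
            exact ih (pos + 8) (by omega) _ _ _ _
          · rw [if_pos rfl, if_pos rfl, if_pos rfl, hch]
            exact ih (pos + 8) (by omega) _ _ _ _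
-- ===== VERDICT (by name: the statement is the Claim_ definition above) =====
theorem loop_parser_spec : Claim_equal_loop_parser := by
  intro s _
  unfold Spec_loop_parser loop_parser loop_parser_alt
  rw [loop_eq s.toList (s.toList.length + 1) 0 (by omega)]
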